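-- pv_equiv track=rewrite | github.com/RayJiazy/MultimediaPlayer | src/SceneDetector.py | split_scene
-- ===== SOURCE A (Python) =====
-- def split_scene(index_array, slack_variable):
--     count = 0
--     mark = 0
--     find_zero = False
--     find_next_oneset = False
--     for i, val in enumerate(index_array):
--         if val == False:
--             find_zero = True
--             if count == slack_variable:
--                 break
--             else:
--                 count += 1
--         else:
--             mark = i
--             if find_zero:
--                 find_next_oneset = True
--             continue
--     return mark
-- ===== SOURCE B (Python) =====
-- def split_scene(index_array, slack_variable):
--     # boundary-then-backward-scan: find the (slack_variable+1)-th False, then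
--     # search the prefix before it backwards for the last non-False entry
--     zeros = [i for i, v in enumerate(index_array) if v == False]
--     if 0 <= slack_variable < len(zeros):
--         stop = zeros[slack_variable]
--     else:
--         stop = len(index_array)
--     for i in range(stop - 1, -1, -1):
--         if index_array[i] != False:
--             return i
--     return 0
-- ===== Notes on version B (the rewrite author's own statement) =====
-- stated objective: alternative
-- what changed: Replaced the single forward remember-last-True pass with a two-phase decomposition: first locate the cutoff index of the (slack_variable+1)-th False (or len if absent/negative slack), then scan the prefix before it backwards and return the first non-False index found, defaulting to 0.
import Mathlib
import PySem

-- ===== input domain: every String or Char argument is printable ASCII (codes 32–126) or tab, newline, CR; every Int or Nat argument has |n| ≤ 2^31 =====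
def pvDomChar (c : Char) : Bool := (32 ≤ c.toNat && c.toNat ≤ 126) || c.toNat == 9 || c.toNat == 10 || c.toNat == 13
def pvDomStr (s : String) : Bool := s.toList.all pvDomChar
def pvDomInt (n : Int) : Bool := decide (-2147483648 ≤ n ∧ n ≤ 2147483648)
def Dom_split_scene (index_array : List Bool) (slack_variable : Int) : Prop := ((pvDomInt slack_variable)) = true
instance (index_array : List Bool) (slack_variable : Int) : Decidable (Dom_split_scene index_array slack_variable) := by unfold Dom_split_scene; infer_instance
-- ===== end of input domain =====

-- B replaces A's forward remember-last pass by a find-the-cutoff-then-backward-scan decomposition; same value everywhere (proved total equivalence).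

-- ===== PORT A =====
-- loop of A: state (count, mark, find_zero, find_next_oneset), i is the enumerate index
def splitSceneLoopA (l : List Bool) (i : Nat) (count mark slack : Int)
    (find_zero find_next_oneset : Bool) : Int :=
  match l with
  | [] => mark
  | val :: rest =>
    if val == false then
      -- find_zero = True; break if count == slack_variable else count += 1
      if count = slack then mark
      else splitSceneLoopA rest (i + 1) (count + 1) mark slack true find_next_oneset
    else
      -- mark = i; if find_zero: find_next_oneset = True
      splitSceneLoopA rest (i + 1) count (i : Int) slack find_zero
        (if find_zero then true else find_next_oneset)

def split_scene (index_array : List Bool) (slack_variable : Int) : Int :=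
  splitSceneLoopA index_array 0 0 0 slack_variable false false

-- ===== PORT B =====
-- port of the comprehension [i for i, v in enumerate(index_array) if v == False]
def zerosIdx (l : List Bool) (i : Nat) : List Nat :=
  match l with
  | [] => []
  | v :: t => if v == false then i :: zerosIdx t (i + 1) else zerosIdx t (i + 1)

-- port of `for i in range(stop - 1, -1, -1): if index_array[i] != False: return i` / `return 0`
def bLoop (xs : List Bool) : Nat → Int
  | 0 => 0
  | n + 1 => if xs.getD n false != false then (n : Int) else bLoop xs n

def split_scene_alt (index_array : List Bool) (slack_variable : Int) : Int :=
  let zeros := zerosIdx index_array 0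
  let stop : Nat :=
    if 0 ≤ slack_variable ∧ slack_variable < (zeros.length : Int) then
      zeros.getD slack_variable.toNat 0
    else index_array.length
  bLoop index_array stop

-- ===== PRECONDITION & SPEC =====
def Spec_split_scene (index_array : List Bool) (slack_variable : Int) (out : Int) : Prop := out = split_scene_alt index_array slack_variable
instance (index_array : List Bool) (slack_variable : Int) (out : Int) : Decidable (Spec_split_scene index_array slack_variable out) := by unfold Spec_split_scene; infer_instance

-- ===== CLAIM (what is proved, stated in full; the proofs are below) =====
def Claim_equal_split_scene : Prop := ∀ (index_array : List Bool) (slack_variable : Int), Dom_split_scene index_array slack_variable → Spec_split_scene index_array slack_variable (split_scene index_array slack_variable)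

-- ===== LEMMAS AND PROOFS =====

-- cutoff position: index (relative) of the False where A's count reaches slack; length if none
def cs (l : List Bool) (s : Int) : Nat :=
  match l with
  | [] => 0
  | v :: t => if v = false then (if s = 0 then 0 else 1 + cs t (s - 1)) else 1 + cs t s

-- forward last-True-before-stop scan with default m, absolute index i
def L (l : List Bool) (i stop : Nat) (m : Int) : Int :=
  match l with
  | [] => m
  | v :: t => if i < stop then L t (i + 1) stop (if v then (i : Int) else m) else m

theorem cs_le (l : List Bool) (s : Int) : cs l s ≤ l.length := by
  induction l generalizing s with
  | nil => exact Nat.le_refl 0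
  | cons v t ih =>
    simp only [cs, List.length_cons]
    split_ifs
    · omega
    · have := ih (s - 1); omega
    · have := ih s; omega

theorem aLoop_eq_L (l : List Bool) : ∀ (i : Nat) (c m slack : Int) (fz fno : Bool),
    splitSceneLoopA l i c m slack fz fno = L l i (i + cs l (slack - c)) m := by
  induction l with
  | nil => intro i c m slack fz fno; simp [splitSceneLoopA, L]
  | cons v t ih =>
    intro i c m slack fz fno
    by_cases hv : v = false
    · subst hv
      by_cases hc : c = slack
      · simp [splitSceneLoopA, L, cs, hc]
      · have hs : slack - c ≠ 0 := by omega
        simp only [splitSceneLoopA, cs, beq_self_eq_true, if_true,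
          if_neg hc, if_neg hs]
        rw [ih]
        have h1 : slack - (c + 1) = slack - c - 1 := by ring
        have h2 : i + (1 + cs t (slack - c - 1)) = (i + 1) + cs t (slack - c - 1) := by omega
        rw [h1, h2]
        have : i < i + 1 + cs t (slack - c - 1) := by omega
        simp [L, this]
    · have hv' : v = true := by cases v <;> simp_all
      subst hv'
      have hcs : cs (true :: t) (slack - c) = 1 + cs t (slack - c) := by
        simp [cs]
      have hlt : i < i + cs (true :: t) (slack - c) := by rw [hcs]; omega
      rw [show splitSceneLoopA (true :: t) i c m slack fz fno
            = splitSceneLoopA t (i + 1) c (i : Int) slack fz (if fz then true else fno) from rfl,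
          ih]
      conv_rhs => rw [L]
      rw [if_pos hlt, hcs]
      have h2 : i + (1 + cs t (slack - c)) = (i + 1) + cs t (slack - c) := by omega
      simp only [if_true, h2]

-- pure forward scan over a fully-consumed prefix
def F (l : List Bool) (i : Nat) (m : Int) : Int :=
  match l with
  | [] => m
  | v :: t => F t (i + 1) (if v then (i : Int) else m)

theorem L_eq_F (l : List Bool) : ∀ (i stop : Nat) (m : Int),
    L l i stop m = F (l.take (stop - i)) i m := by
  induction l with
  | nil => intro i stop m; simp [L, F]
  | cons v t ih =>
    intro i stop m
    by_cases h : i < stop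
    · have h1 : stop - i = (stop - (i + 1)) + 1 := by omega
      simp only [L, if_pos h, ih, h1, List.take_succ_cons]
      rfl
    · have h1 : stop - i = 0 := by omega
      simp [L, F, h, h1]

theorem F_append (l : List Bool) (v : Bool) : ∀ (i : Nat) (m : Int),
    F (l ++ [v]) i m = if v then ((i + l.length : Nat) : Int) else F l i m := by
  induction l with
  | nil => intro i m; simp [F]
  | cons w t ih =>
    intro i m
    simp only [List.cons_append, F, ih, List.length_cons]
    cases v
    · simp
    · simp only [if_true]
      congr 1
      omega

theorem bLoop_eq_F (xs : List Bool) : ∀ (s : Nat), s ≤ xs.length →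
    bLoop xs s = F (xs.take s) 0 0 := by
  intro s
  induction s with
  | zero => intro _; simp [bLoop, F]
  | succ n ih =>
    intro hle
    have hn : n < xs.length := by omega
    have htake : xs.take (n + 1) = xs.take n ++ [xs.getD n false] := by
      rw [List.take_add_one]
      congr 1
      simp [List.getElem?_eq_getElem hn, List.getD]
    have hlen : (xs.take n).length = n := by
      simp [List.length_take]; omega
    rw [bLoop, htake, F_append, hlen]
    cases hv : xs.getD n false
    · simp [ih (by omega)]
    · simp

theorem zerosIdx_stop (l : List Bool) : ∀ (i : Nat) (s : Int),
    (if 0 ≤ s ∧ s < ((zerosIdx l i).length : Int) then (zerosIdx l i).getD s.toNat 0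
     else i + l.length) = i + cs l s := by
  induction l with
  | nil => intro i s; simp [zerosIdx, cs]
  | cons v t ih =>
    intro i s
    by_cases hv : v = false
    · subst hv
      simp only [zerosIdx, cs, beq_self_eq_true, if_true]
      by_cases hs : s = 0
      · subst hs; simp
      · have h := ih (i + 1) (s - 1)
        by_cases hin : 0 ≤ s ∧ s < ((i :: zerosIdx t (i + 1)).length : Int)
        · have hpos : 0 < s := by omega
          have hlen : (0 : Int) ≤ s - 1 ∧ s - 1 < ((zerosIdx t (i + 1)).length : Int) := by
            simp only [List.length_cons] at hin; push_cast at hin ⊢; omega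
          rw [if_pos hin, if_neg hs]
          have htoNat : s.toNat = (s - 1).toNat + 1 := by omega
          rw [htoNat]
          simp only [List.getD_cons_succ]
          rw [if_pos hlen] at h
          omega
        · rw [if_neg hin, if_neg hs]
          have hout : ¬ (0 ≤ s - 1 ∧ s - 1 < ((zerosIdx t (i + 1)).length : Int)) := by
            simp only [List.length_cons] at hin; push_cast at hin ⊢; omega
          rw [if_neg hout] at h
          simp only [List.length_cons]
          omega
    · have hv' : v = true := by cases v <;> simp_all
      subst hv'
      simp only [zerosIdx, cs, show ((true == false) = false) from rfl,
        Bool.false_eq_true, if_false, if_neg (by decide : ¬ (true = false))]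
      have h := ih (i + 1) s
      split_ifs at h ⊢ with hin
      · omega
      · simp only [List.length_cons]; omega

-- ===== VERDICT (by name: the statement is the Claim_ definition above) =====
theorem split_scene_spec : Claim_equal_split_scene := by
  intro xs slack _
  unfold Spec_split_scene split_scene split_scene_alt
  have hstop := zerosIdx_stop xs 0 slack
  simp only [Nat.zero_add] at hstop
  rw [aLoop_eq_L, L_eq_F]
  simp only [Int.sub_zero, Nat.zero_add, Nat.sub_zero]
  rw [hstop, bLoop_eq_F xs _ (cs_le xs slack)]
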